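-- pv_equiv track=rewrite | github.com/toptotop46-workacc/Bonus_9 | modules/proxy_utils.py | referral_ref_alternatives
-- ===== SOURCE A (Python) =====
-- def referral_ref_alternatives(
--     cleaned: list[str],
--     base_idx: int,
--     main_p: str,
-- ) -> list[str]:
--     """Все отличные от main_p прокси по порядку от base_idx (для ротации приглашённого)."""
--     n = len(cleaned)
--     out: list[str] = []
--     seen: set[str] = set()
--     for k in range(1, n + 1):
--         c = cleaned[(base_idx + k) % n]
--         if c != main_p and c not in seen:
--             seen.add(c)
--             out.append(c)
--     return out
-- ===== SOURCE B (Python) =====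
-- def referral_ref_alternatives(
--     cleaned: list[str],
--     base_idx: int,
--     main_p: str,
-- ) -> list[str]:
--     # For each distinct proxy != main_p, compute its minimal rotation offset
--     # (steps after base_idx at which it first comes up), then sort by that key.
--     n = len(cleaned)
--     first: dict[str, int] = {}
--     for i, c in enumerate(cleaned):
--         if c != main_p:
--             off = (i - base_idx - 1) % n
--             if c not in first or off < first[c]:
--                 first[c] = off
--     return sorted(first, key=lambda c: first[c])
-- ===== Notes on version B (the rewrite author's own statement) =====
-- stated objective: alternative
-- what changed: Instead of A's sequential walk through rotation order with a seen-set, B makes one pass over the original list recording for each distinct proxy != main_p its minimal rotation offset ((i - base_idx - 1) % n) in a dict, then returns the keys sorted by that offset; the rotation-order dedup is replaced by a key-extraction-plus-sort over distinct values.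
import Mathlib
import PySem

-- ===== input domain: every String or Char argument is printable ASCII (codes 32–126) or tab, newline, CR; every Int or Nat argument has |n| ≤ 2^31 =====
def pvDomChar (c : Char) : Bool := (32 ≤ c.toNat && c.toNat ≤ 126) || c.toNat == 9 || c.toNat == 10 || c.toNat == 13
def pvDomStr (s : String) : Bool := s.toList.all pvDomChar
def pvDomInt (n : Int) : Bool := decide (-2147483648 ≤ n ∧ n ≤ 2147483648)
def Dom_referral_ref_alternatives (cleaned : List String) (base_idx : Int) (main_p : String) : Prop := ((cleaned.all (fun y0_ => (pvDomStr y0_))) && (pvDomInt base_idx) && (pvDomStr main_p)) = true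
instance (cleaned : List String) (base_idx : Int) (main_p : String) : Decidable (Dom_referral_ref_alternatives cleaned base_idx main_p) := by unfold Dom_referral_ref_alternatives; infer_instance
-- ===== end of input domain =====

-- B replaces A's sequential rotate-scan-and-dedup with a different algorithm: one pass over the
-- ORIGINAL list records, per distinct proxy != main_p, its minimal rotation offset in a dict,
-- and the answer is the dict's keys sorted by that offset (alternative; neither mutates).

-- ===== PORT A =====
def referral_ref_alternatives (cleaned : List String) (base_idx : Int) (main_p : String) : List String :=
  let n : Int := cleaned.length
  ((PySem.List.pyRange 1 (n + 1) 1).foldl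
    (fun (st : List String × PySem.Set String) k =>
      -- index (base_idx + k) % n is always in range here: the loop only runs when n > 0
      let c := PySem.List.pyGetD cleaned (PySem.Int.mod (base_idx + k) n) ""
      if c ≠ main_p ∧ ¬ PySem.Set.contains st.2 c then (st.1 ++ [c], PySem.Set.add st.2 c) else st)
    ([], PySem.Set.empty)).1

-- ===== PORT B =====
-- B-side helper: the body of B's dict-building loop ('first[c] = off' kept iff new key or smaller offset)
def rrUpd (main_p : String) (base_idx n : Int) (d : PySem.Dict String Int) (ic : Int × String) : PySem.Dict String Int :=
  if ic.2 ≠ main_p then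
    let off := PySem.Int.mod (ic.1 - base_idx - 1) n
    match PySem.Dict.get? d ic.2 with
    | none => PySem.Dict.insert d ic.2 off
    | some v => if off < v then PySem.Dict.insert d ic.2 off else d
  else d

def referral_ref_alternatives_alt (cleaned : List String) (base_idx : Int) (main_p : String) : List String :=
  let n : Int := cleaned.length
  let first := (PySem.List.enumerate cleaned).foldl (rrUpd main_p base_idx n) PySem.Dict.empty
  -- sorted(first, key=lambda c: first[c]); every key is in the dict, so getD's default is never used
  PySem.List.sorted (PySem.Dict.keys first) (fun c => PySem.Dict.getD first c 0)

-- ===== PRECONDITION & SPEC =====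
def Spec_referral_ref_alternatives (cleaned : List String) (base_idx : Int) (main_p : String) (out : List String) : Prop := out = referral_ref_alternatives_alt cleaned base_idx main_p
instance (cleaned : List String) (base_idx : Int) (main_p : String) (out : List String) : Decidable (Spec_referral_ref_alternatives cleaned base_idx main_p out) := by unfold Spec_referral_ref_alternatives; infer_instance

-- ===== CLAIM (what is proved, stated in full; the proofs are below) =====
def Claim_equal_referral_ref_alternatives : Prop := ∀ (cleaned : List String) (base_idx : Int) (main_p : String), Dom_referral_ref_alternatives cleaned base_idx main_p → Spec_referral_ref_alternatives cleaned base_idx main_p (referral_ref_alternatives cleaned base_idx main_p)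

-- ===== LEMMAS AND PROOFS =====

-- Both programs' result is characterised as the ordered dedup of the rotation, main_p removed:
def rotD (cleaned : List String) (base_idx : Int) (main_p : String) : List String :=
  let s := (PySem.Int.mod (base_idx + 1) (cleaned.length : Int)).toNat
  PySem.List.dedup ((cleaned.drop s ++ cleaned.take s).filter (fun c => c != main_p))

-- rotation as indexed reads: reading xs at (s+j) % n for j = 0..n-1 is xs.drop s ++ xs.take s
lemma rot_read {α : Type} [Inhabited α] (xs : List α) (s : Nat) (hs : s < xs.length) (d : α) :
    (List.range xs.length).map (fun j => xs.getD ((s + j) % xs.length) d) = xs.drop s ++ xs.take s := by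
  apply List.ext_getElem
  · simp; omega
  · intro t h1 h2
    have ht : t < xs.length := by simpa using h1
    simp only [List.getElem_map, List.getElem_range]
    have hlen : (xs.drop s).length = xs.length - s := by simp
    rcases Nat.lt_or_ge t (xs.length - s) with h | h
    · rw [List.getElem_append_left (by omega)]
      have hm : (s + t) % xs.length = s + t := Nat.mod_eq_of_lt (by omega)
      rw [hm, List.getElem_drop]
      simp [List.getD_eq_getElem?_getD, List.getElem?_eq_getElem (by omega : s + t < xs.length)]
    · rw [List.getElem_append_right (by omega)]
      have hmod : (s + t) % xs.length = t - (xs.length - s) := by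
        have h4 : s + t - xs.length = t - (xs.length - s) := by omega
        rw [Nat.mod_eq_sub_mod (by omega), Nat.mod_eq_of_lt (by omega), h4]
      rw [hmod]
      simp only [hlen, List.getElem_take]
      simp [List.getD_eq_getElem?_getD,
        List.getElem?_eq_getElem (by omega : t - (xs.length - s) < xs.length)]

-- elementwise form of rot_read
lemma rot_get (xs : List String) (s : Nat) (hs : s < xs.length) (k : Nat)
    (hk' : k < (xs.drop s ++ xs.take s).length) :
    (xs.drop s ++ xs.take s)[k]
      = xs[(s + k) % xs.length]'(Nat.mod_lt _ (by omega)) := by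
  have hk : k < xs.length := by
    have := hk'; simp at this; omega
  rw [List.getElem_of_eq (rot_read xs s hs "").symm hk']
  rw [List.getElem_map, List.getElem_range]
  have hm : (s + k) % xs.length < xs.length := Nat.mod_lt _ (by omega)
  simp [List.getD_eq_getElem?_getD, List.getElem?_eq_getElem hm]

-- A's paired (out, seen) fold stays diagonal: seen is exactly out as a list
lemma fold_diag (main_p : String) (xs : List String) (o : List String) :
    (xs.foldl
      (fun (st : List String × PySem.Set String) c =>
        if c ≠ main_p ∧ ¬ PySem.Set.contains st.2 c then (st.1 ++ [c], PySem.Set.add st.2 c) else st)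
      (o, o)).1
    = xs.foldl (fun o c => if c ≠ main_p ∧ ¬ PySem.Set.contains o c then o ++ [c] else o) o := by
  induction xs generalizing o with
  | nil => rfl
  | cons x xs ih =>
    simp only [List.foldl_cons]
    by_cases h : x ≠ main_p ∧ ¬ PySem.Set.contains o x
    · simp only [if_pos h]
      have hx : x ∉ o := fun hm => h.2 ((PySem.Set.contains_iff o x).mpr hm)
      rw [PySem.Set.add_of_not_mem hx]
      exact ih (o ++ [x])
    · simp only [if_neg h]; exact ih o

-- the guarded fold is Set.add folded over the filtered list
lemma fold_filter (main_p : String) (xs : List String) (o : List String) :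
    xs.foldl (fun o c => if c ≠ main_p ∧ ¬ PySem.Set.contains o c then o ++ [c] else o) o
    = (xs.filter (fun c => c != main_p)).foldl PySem.Set.add o := by
  induction xs generalizing o with
  | nil => rfl
  | cons x xs ih =>
    simp only [List.foldl_cons, List.filter_cons]
    by_cases hp : x = main_p
    · rw [if_neg (by simp [hp]), if_neg (by simp [hp])]
      exact ih o
    · have hne : (x != main_p) = true := by simp [hp]
      rw [hne]
      simp only [if_true, List.foldl_cons]
      have hstep : (if x ≠ main_p ∧ ¬ PySem.Set.contains o x then o ++ [x] else o)
          = PySem.Set.add o x := by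
        by_cases hc : x ∈ o
        · rw [if_neg (by simp [hc]), PySem.Set.add_of_mem hc]
        · rw [if_pos ⟨hp, by simp [hc]⟩, PySem.Set.add_of_not_mem hc]
      rw [hstep]; exact ih _

-- A computes rotD (nonempty input)
lemma A_eq_rotD (cleaned : List String) (base_idx : Int) (main_p : String)
    (hpos : 0 < cleaned.length) :
    referral_ref_alternatives cleaned base_idx main_p = rotD cleaned base_idx main_p := by
  unfold referral_ref_alternatives rotD
  dsimp only
  have hNpos : (0:Int) < (cleaned.length : Int) := by exact_mod_cast hpos
  have hmodpos := PySem.Int.mod_nonneg (base_idx + 1) hNpos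
  have hmodlt := PySem.Int.mod_lt (base_idx + 1) hNpos
  set s : Nat := (PySem.Int.mod (base_idx + 1) (cleaned.length : Int)).toNat with hsdef
  have hcast : PySem.Int.mod (base_idx + 1) (cleaned.length : Int) = (s : Int) := by
    rw [hsdef, Int.toNat_of_nonneg hmodpos]
  have hs : s < cleaned.length := by omega
  have hrange : PySem.List.pyRange 1 ((cleaned.length:Int) + 1) 1
      = (List.range cleaned.length).map (fun j : Nat => (1:Int) + (j:Int)) := by
    rw [PySem.List.pyRange_one,
      (by omega : (((cleaned.length:Int) + 1) - 1).toNat = cleaned.length)]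
  rw [hrange, List.foldl_map]
  rw [← List.foldl_map
    (f := fun j : Nat => PySem.List.pyGetD cleaned
      (PySem.Int.mod (base_idx + (1 + (j:Int))) (cleaned.length : Int)) "")
    (g := fun (st : List String × PySem.Set String) c =>
      if c ≠ main_p ∧ ¬ PySem.Set.contains st.2 c then (st.1 ++ [c], PySem.Set.add st.2 c) else st)]
  have hmap : (List.range cleaned.length).map
      (fun j : Nat => PySem.List.pyGetD cleaned
        (PySem.Int.mod (base_idx + (1 + (j:Int))) (cleaned.length : Int)) "")
      = cleaned.drop s ++ cleaned.take s := by
    rw [← rot_read cleaned s hs ""]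
    apply List.map_congr_left
    intro j hj
    have hj' : j < cleaned.length := List.mem_range.mp hj
    have hidx : PySem.Int.mod (base_idx + (1 + (j:Int))) (cleaned.length : Int)
        = (((s + j) % cleaned.length : Nat) : Int) := by
      rw [PySem.Int.mod_eq_emod_of_pos hNpos]
      have h1 : PySem.Int.mod (base_idx + 1) (cleaned.length : Int)
          = (base_idx + 1) % (cleaned.length : Int) :=
        PySem.Int.mod_eq_emod_of_pos hNpos
      rw [h1] at hcast
      push_cast
      rw [show base_idx + (1 + (j:Int)) = (base_idx + 1) + (j:Int) by ring,
        Int.add_emod, hcast]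
      have hsnn : (0:Int) ≤ (s:Int) := Int.natCast_nonneg s
      have hslt : (s:Int) < (cleaned.length:Int) := by exact_mod_cast hs
      conv_rhs => rw [Int.add_emod, Int.emod_eq_of_lt hsnn hslt]
    rw [hidx, PySem.List.pyGetD_natCast]
  rw [hmap,
    show (([] : List String), (PySem.Set.empty : PySem.Set String))
        = (([] : List String), ([] : List String)) from rfl,
    fold_diag, fold_filter]
  simp [PySem.List.dedup_eq_ofList, PySem.Set.ofList_eq_foldl]

-- ---------- B-side machinery ----------

-- B's loop body on pre-computed (offset, value) pairs
def rrStep2 (main_p : String) (d : PySem.Dict String Int) (p : Int × String) : PySem.Dict String Int :=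
  if p.2 ≠ main_p then
    match PySem.Dict.get? d p.2 with
    | none => PySem.Dict.insert d p.2 p.1
    | some v => if p.1 < v then PySem.Dict.insert d p.2 p.1 else d
  else d

-- running minimum of a list of offsets, seeded with an optional current value
def omin (o : Option Int) (l : List Int) : Option Int :=
  l.foldl (fun a x => some (match a with | none => x | some v => min v x)) o

lemma omin_cons (o : Option Int) (x : Int) (l : List Int) :
    omin o (x :: l) = omin (some (match o with | none => x | some v => min v x)) l := rfl

lemma keys_nodup_fold (mp : String) :
    ∀ (ps : List (Int × String)) (d : PySem.Dict String Int),
      d.keys.Nodup → ((ps.foldl (rrStep2 mp) d)).keys.Nodup := by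
  intro ps
  induction ps with
  | nil => intro d h; exact h
  | cons p ps ih =>
    intro d h
    simp only [List.foldl_cons]
    apply ih
    unfold rrStep2
    split_ifs with h1
    · cases hg : PySem.Dict.get? d p.2 with
      | none => exact PySem.Dict.nodup_keys_insert d p.2 p.1 h
      | some v =>
        dsimp only
        split_ifs with h2
        · exact PySem.Dict.nodup_keys_insert d p.2 p.1 h
        · exact h
    · exact h

lemma mem_keys_fold (mp : String) :
    ∀ (ps : List (Int × String)) (d : PySem.Dict String Int) (c : String),
      c ∈ ((ps.foldl (rrStep2 mp) d)).keys ↔ (c ∈ d.keys ∨ ∃ p ∈ ps, p.2 = c ∧ c ≠ mp) := by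
  intro ps
  induction ps with
  | nil => intro d c; simp
  | cons p ps ih =>
    intro d c
    simp only [List.foldl_cons]
    rw [ih]
    have hstep : c ∈ (rrStep2 mp d p).keys ↔ (c ∈ d.keys ∨ (p.2 = c ∧ c ≠ mp)) := by
      unfold rrStep2
      split_ifs with h1
      · cases hg : PySem.Dict.get? d p.2 with
        | none =>
          rw [PySem.Dict.mem_keys_insert]
          constructor
          · rintro (rfl | h) <;> tauto
          · rintro (h | ⟨rfl, h⟩) <;> tauto
        | some v =>
          dsimp only
          split_ifs with h2
          · rw [PySem.Dict.mem_keys_insert]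
            constructor
            · rintro (rfl | h) <;> tauto
            · rintro (h | ⟨rfl, h⟩) <;> tauto
          · constructor
            · tauto
            · rintro (h | ⟨rfl, hc⟩)
              · exact h
              · have : PySem.Dict.get? d p.2 ≠ none := by rw [hg]; simp
                by_contra hmem
                exact this ((PySem.Dict.get?_eq_none_iff_not_mem_keys d p.2).mpr hmem)
      · rw [ne_eq, not_not] at h1
        constructor
        · tauto
        · rintro (h | ⟨rfl, hc⟩)
          · exact h
          · exact absurd h1 hc
    rw [hstep]
    constructor
    · rintro ((h | h) | ⟨q, hq, h⟩)
      · exact Or.inl h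
      · exact Or.inr ⟨p, by simp, h⟩
      · exact Or.inr ⟨q, by simp [hq], h⟩
    · rintro (h | ⟨q, hq, h2, h3⟩)
      · exact Or.inl (Or.inl h)
      · rcases List.mem_cons.mp hq with rfl | hq'
        · exact Or.inl (Or.inr ⟨h2, h3⟩)
        · exact Or.inr ⟨q, hq', h2, h3⟩

lemma get?_fold (mp : String) :
    ∀ (ps : List (Int × String)) (d : PySem.Dict String Int) (c : String), c ≠ mp →
      ((ps.foldl (rrStep2 mp) d)).get? c
        = omin (d.get? c) ((ps.filter (fun p => p.2 == c)).map (·.1)) := by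
  intro ps
  induction ps with
  | nil => intro d c _; rfl
  | cons p ps ih =>
    intro d c hc
    simp only [List.foldl_cons, List.filter_cons]
    by_cases hpc : p.2 = c
    · subst hpc
      have hbeq : (p.2 == p.2) = true := by simp
      rw [hbeq]
      simp only [if_true, List.map_cons, omin_cons]
      have hstep : (rrStep2 mp d p).get? p.2
          = some (match d.get? p.2 with | none => p.1 | some v => min v p.1) := by
        unfold rrStep2
        rw [if_pos hc]
        cases hg : PySem.Dict.get? d p.2 with
        | none =>
          dsimp only
          exact PySem.Dict.get?_insert_self d p.2 p.1
        | some v =>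
          dsimp only
          split_ifs with h2
          · rw [PySem.Dict.get?_insert_self, min_eq_right (le_of_lt h2)]
          · rw [hg, min_eq_left (by omega)]
      rw [ih _ p.2 hc, hstep]
    · have hbeq : (p.2 == c) = false := by simp [hpc]
      rw [hbeq]
      simp only [Bool.false_eq_true, if_false]
      have hstep : (rrStep2 mp d p).get? c = d.get? c := by
        unfold rrStep2
        split_ifs with h1
        · cases hg : PySem.Dict.get? d p.2 with
          | none =>
            dsimp only
            exact PySem.Dict.get?_insert_of_ne d p.1 (fun h => hpc h.symm)
          | some v =>
            dsimp only
            split_ifs with h2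
            · exact PySem.Dict.get?_insert_of_ne d p.1 (fun h => hpc h.symm)
            · rfl
        · rfl
      rw [ih _ c hc, hstep]

lemma omin_lb : ∀ (l : List Int) (m : Int), (∀ x ∈ l, m ≤ x) → omin (some m) l = some m := by
  intro l
  induction l with
  | nil => intro m _; rfl
  | cons x l ih =>
    intro m h
    rw [omin_cons]
    dsimp only
    have : min m x = m := min_eq_left (h x (by simp))
    rw [this]
    exact ih m (fun y hy => h y (by simp [hy]))

lemma omin_perm : ∀ {l l' : List Int}, l.Perm l' → ∀ o, omin o l = omin o l' := by
  intro l l' hp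
  induction hp with
  | nil => intro o; rfl
  | cons x _ ih => intro o; rw [omin_cons, omin_cons, ih]
  | swap x y l =>
    intro o
    rw [omin_cons, omin_cons, omin_cons, omin_cons]
    congr 1
    cases o with
    | none => simp [min_comm]
    | some v => simp [min_right_comm]
  | trans _ _ ih1 ih2 => intro o; rw [ih1, ih2]

lemma vals_lb (c : String) :
    ∀ (xs : List String) (s0 : Int) (x : Int),
      x ∈ ((PySem.List.enumerate xs s0).filter (fun p => p.2 == c)).map (·.1) → s0 ≤ x := by
  intro xs
  induction xs with
  | nil => intro s0 x h; simp [PySem.List.enumerate_nil] at h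
  | cons y xs ih =>
    intro s0 x h
    rw [PySem.List.enumerate_cons] at h
    simp only [List.filter_cons] at h
    by_cases hyc : y = c
    · rw [if_pos (by simp [hyc])] at h
      simp only [List.map_cons, List.mem_cons] at h
      rcases h with rfl | h
      · exact le_refl _
      · have := ih (s0 + 1) x h; omega
    · rw [if_neg (by simp [hyc])] at h
      have := ih (s0 + 1) x h; omega

lemma omin_enum (c : String) :
    ∀ (xs : List String) (s0 : Int), c ∈ xs →
      omin none (((PySem.List.enumerate xs s0).filter (fun p => p.2 == c)).map (·.1))
        = some (s0 + (List.idxOf c xs : Int)) := by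
  intro xs
  induction xs with
  | nil => intro s0 h; simp at h
  | cons y xs ih =>
    intro s0 hc
    rw [PySem.List.enumerate_cons]
    simp only [List.filter_cons]
    by_cases hyc : y = c
    · rw [if_pos (by simp [hyc])]
      simp only [List.map_cons, omin_cons]
      rw [omin_lb _ _ (fun x hx => by have := vals_lb c xs (s0+1) x hx; omega)]
      subst hyc
      simp [List.idxOf_cons_self]
    · rw [if_neg (by simp [hyc])]
      have hc' : c ∈ xs := by
        rcases List.mem_cons.mp hc with rfl | h
        · exact absurd rfl hyc
        · exact h
      rw [ih (s0 + 1) hc']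
      rw [List.idxOf_cons_ne _ hyc]
      push_cast
      ring_nf

-- the offset-tagged traversal of cleaned is a rotation of the enumeration of the rotated list
lemma ps_eq_rot (cleaned : List String) (bi : Int) (s : Nat) (hs : s < cleaned.length)
    (hcast : PySem.Int.mod (bi + 1) (cleaned.length : Int) = (s : Int)) :
    (PySem.List.enumerate cleaned).map
        (fun p => (PySem.Int.mod (p.1 - bi - 1) (cleaned.length : Int), p.2))
      = (PySem.List.enumerate (cleaned.drop s ++ cleaned.take s)).drop (cleaned.length - s)
        ++ (PySem.List.enumerate (cleaned.drop s ++ cleaned.take s)).take (cleaned.length - s) := by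
  have hNpos : (0:Int) < (cleaned.length : Int) := by
    exact_mod_cast Nat.lt_of_le_of_lt (Nat.zero_le s) hs
  rw [PySem.Int.mod_eq_emod_of_pos hNpos] at hcast
  have hrotlen : (cleaned.drop s ++ cleaned.take s).length = cleaned.length := by
    simp; omega
  have hE : (PySem.List.enumerate (cleaned.drop s ++ cleaned.take s)).length = cleaned.length := by
    rw [PySem.List.length_enumerate, hrotlen]
  have hmod : ∀ j : Nat, j < cleaned.length →
      PySem.Int.mod ((0 + (j:Int)) - bi - 1) (cleaned.length : Int)
        = ((j:Int) - (s:Int)) % (cleaned.length : Int) := by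
    intro j hj
    rw [PySem.Int.mod_eq_emod_of_pos hNpos]
    have h1 : (0 + (j:Int)) - bi - 1 = (j:Int) - (bi + 1) := by ring
    have hjj : (j:Int) % (cleaned.length : Int) = (j:Int) :=
      Int.emod_eq_of_lt (by exact_mod_cast Nat.zero_le j) (by exact_mod_cast hj)
    rw [h1, Int.sub_emod, hcast, hjj]
  apply List.ext_getElem
  · rw [List.length_map, PySem.List.length_enumerate, List.length_append,
      List.length_drop, List.length_take, hE]
    omega
  · intro j hj1 hj2
    have hjn : j < cleaned.length := by
      rw [List.length_map, PySem.List.length_enumerate] at hj1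
      exact hj1
    rw [List.getElem_map,
      PySem.List.getElem_enumerate cleaned 0 j (by rw [PySem.List.length_enumerate]; exact hjn)]
    rcases Nat.lt_or_ge j s with hjs | hjs
    · -- j < s : the right-hand element is E[(n-s)+j]
      have hlt : j < ((PySem.List.enumerate (cleaned.drop s ++ cleaned.take s)).drop
          (cleaned.length - s)).length := by
        rw [List.length_drop, hE]; omega
      rw [List.getElem_append_left hlt, List.getElem_drop,
        PySem.List.getElem_enumerate (cleaned.drop s ++ cleaned.take s) 0
          (cleaned.length - s + j) (by rw [PySem.List.length_enumerate, hrotlen]; omega)]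
      have hval : (cleaned.drop s ++ cleaned.take s)[cleaned.length - s + j]'(by
            rw [hrotlen]; omega)
          = cleaned[j]'hjn := by
        rw [rot_get cleaned s hs (cleaned.length - s + j) (by rw [hrotlen]; omega)]
        have hidx : (s + (cleaned.length - s + j)) % cleaned.length = j := by
          have h2 : s + (cleaned.length - s + j) = cleaned.length + j := by omega
          rw [h2, Nat.add_mod_left, Nat.mod_eq_of_lt hjn]
        exact getElem_congr rfl hidx (by omega)
      have hint : PySem.Int.mod ((0 + (j:Int)) - bi - 1) (cleaned.length : Int)
          = 0 + ((cleaned.length - s + j : Nat) : Int) := by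
        rw [hmod j hjn]
        have h2 : ((j:Int) - (s:Int)) % (cleaned.length : Int)
            = ((j:Int) - (s:Int) + (cleaned.length : Int)) % (cleaned.length : Int) :=
          (Int.add_emod_right _ _).symm
        rw [h2, Int.emod_eq_of_lt (by omega) (by omega)]
        push_cast
        omega
      rw [hint, hval]
    · -- j ≥ s : the right-hand element is E[j - s]
      have hge : ((PySem.List.enumerate (cleaned.drop s ++ cleaned.take s)).drop
          (cleaned.length - s)).length ≤ j := by
        rw [List.length_drop, hE]; omega
      rw [List.getElem_append_right hge, List.getElem_take]
      have hidx0 : j - ((PySem.List.enumerate (cleaned.drop s ++ cleaned.take s)).drop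
          (cleaned.length - s)).length = j - s := by
        rw [List.length_drop, hE]; omega
      rw [getElem_congr rfl hidx0 (by rw [PySem.List.length_enumerate, hrotlen]; omega),
        PySem.List.getElem_enumerate (cleaned.drop s ++ cleaned.take s) 0
          (j - s) (by rw [PySem.List.length_enumerate, hrotlen]; omega)]
      have hval : (cleaned.drop s ++ cleaned.take s)[j - s]'(by rw [hrotlen]; omega)
          = cleaned[j]'hjn := by
        rw [rot_get cleaned s hs (j - s) (by rw [hrotlen]; omega)]
        have hidx : (s + (j - s)) % cleaned.length = j := by
          have h2 : s + (j - s) = j := by omega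
          rw [h2, Nat.mod_eq_of_lt hjn]
        exact getElem_congr rfl hidx (by omega)
      have hint : PySem.Int.mod ((0 + (j:Int)) - bi - 1) (cleaned.length : Int)
          = 0 + ((j - s : Nat) : Int) := by
        rw [hmod j hjn, Int.emod_eq_of_lt (by omega) (by omega)]
        omega
      rw [hint, hval]

-- ordered dedup, cons characterisation: PySem.List.dedup keeps first occurrences
lemma foldl_add_acc {α : Type} [BEq α] [LawfulBEq α] :
    ∀ (ys acc : List α),
      ys.foldl PySem.Set.add acc = acc ++ (ys.foldl PySem.Set.add []).filter (fun v => !acc.contains v) := by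
  intro ys
  induction ys with
  | nil => intro acc; simp
  | cons x xs ih =>
    intro acc
    simp only [List.foldl_cons]
    rw [ih (PySem.Set.add acc x), ih (PySem.Set.add [] x)]
    by_cases hx : x ∈ acc
    · have h1 : PySem.Set.add acc x = acc := PySem.Set.add_of_mem hx
      have h2 : PySem.Set.add ([] : List α) x = [x] := PySem.Set.add_of_not_mem (by simp)
      rw [h1, h2]
      congr 1
      rw [List.filter_append]
      have h3 : ([x].filter (fun v => !acc.contains v)) = [] := by
        simp [hx]
      rw [h3, List.nil_append, List.filter_filter]
      apply List.filter_congr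
      intro v hv
      by_cases hvx : v = x
      · subst hvx
        simp [hx]
      · simp [hvx]
    · have h1 : PySem.Set.add acc x = acc ++ [x] := PySem.Set.add_of_not_mem hx
      have h2 : PySem.Set.add ([] : List α) x = [x] := PySem.Set.add_of_not_mem (by simp)
      rw [h1, h2, List.append_assoc]
      congr 1
      rw [List.filter_append]
      have h3 : ([x].filter (fun v => !acc.contains v)) = [x] := by
        simp [hx]
      rw [h3, List.filter_filter]
      congr 1
      apply List.filter_congr
      intro v hv
      by_cases hvx : v = x
      · subst hvx
        simp [hx]
      · by_cases hva : v ∈ acc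
        · simp [hvx, hva]
        · simp [hvx, hva]

lemma dedup_cons {α : Type} [BEq α] [LawfulBEq α] (x : α) (xs : List α) :
    PySem.List.dedup (x :: xs) = x :: (PySem.List.dedup xs).filter (fun v => !(v == x)) := by
  rw [PySem.List.dedup_eq_ofList, PySem.List.dedup_eq_ofList,
    PySem.Set.ofList_eq_foldl, PySem.Set.ofList_eq_foldl]
  simp only [List.foldl_cons]
  have h2 : PySem.Set.add ([] : List α) x = [x] := PySem.Set.add_of_not_mem (by simp)
  rw [h2, foldl_add_acc xs [x]]
  simp only [List.singleton_append, List.cons.injEq, true_and]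
  apply List.filter_congr
  intro v hv
  simp

lemma pairwise_dedup_idx {α : Type} [BEq α] [LawfulBEq α] :
    ∀ (l : List α), (PySem.List.dedup l).Pairwise (fun a b => l.idxOf a < l.idxOf b) := by
  intro l
  induction l with
  | nil => simp [PySem.List.dedup]
  | cons x l ih =>
    rw [dedup_cons]
    constructor
    · intro b hb
      have hbx : b ≠ x := by
        have := List.of_mem_filter hb
        simpa using this
      rw [List.idxOf_cons_self, List.idxOf_cons_ne _ (fun h => hbx h.symm)]
      omega
    · have h1 : ((PySem.List.dedup l).filter (fun v => !(v == x))).Pairwise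
          (fun a b => l.idxOf a < l.idxOf b) := List.Pairwise.filter _ ih
      apply h1.imp_of_mem
      intro a b ha hb hab
      have hax : a ≠ x := by have := List.of_mem_filter ha; simpa using this
      have hbx : b ≠ x := by have := List.of_mem_filter hb; simpa using this
      rw [List.idxOf_cons_ne _ (fun h => hax h.symm), List.idxOf_cons_ne _ (fun h => hbx h.symm)]
      omega

lemma idxOf_filter_lt {α : Type} [BEq α] [LawfulBEq α] (p : α → Bool) :
    ∀ (xs : List α) (a b : α), a ∈ xs.filter p → b ∈ xs.filter p →
      (xs.filter p).idxOf a < (xs.filter p).idxOf b → xs.idxOf a < xs.idxOf b := by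
  intro xs
  induction xs with
  | nil => intro a b ha; simp at ha
  | cons x xs ih =>
    intro a b ha hb hlt
    by_cases hpx : p x
    · rw [List.filter_cons_of_pos hpx] at ha hb hlt
      by_cases hax : a = x
      · subst hax
        rw [List.idxOf_cons_self]
        have hba : b ≠ a := by
          intro h
          subst h
          simp [List.idxOf_cons_self] at hlt
        rw [List.idxOf_cons_ne _ (fun h => hba h.symm)]
        omega
      · have hbx : b ≠ x := by
          intro h
          subst h
          rw [List.idxOf_cons_self] at hlt
          omega
        rw [List.idxOf_cons_ne _ (fun h => hax h.symm),
          List.idxOf_cons_ne _ (fun h => hbx h.symm)] at hlt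
        have ha' : a ∈ xs.filter p := by
          rcases List.mem_cons.mp ha with rfl | h
          · exact absurd rfl hax
          · exact h
        have hb' : b ∈ xs.filter p := by
          rcases List.mem_cons.mp hb with rfl | h
          · exact absurd rfl hbx
          · exact h
        rw [List.idxOf_cons_ne _ (fun h => hax h.symm), List.idxOf_cons_ne _ (fun h => hbx h.symm)]
        have := ih a b ha' hb' (by omega)
        omega
    · rw [List.filter_cons_of_neg hpx] at ha hb hlt
      have hax : a ≠ x := by
        intro h; subst h
        exact hpx (List.of_mem_filter ha)
      have hbx : b ≠ x := by
        intro h; subst h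
        exact hpx (List.of_mem_filter hb)
      rw [List.idxOf_cons_ne _ (fun h => hax h.symm), List.idxOf_cons_ne _ (fun h => hbx h.symm)]
      have := ih a b ha hb hlt
      omega

-- B computes rotD (nonempty input)
lemma B_eq_rotD (cleaned : List String) (base_idx : Int) (main_p : String)
    (hpos : 0 < cleaned.length) :
    referral_ref_alternatives_alt cleaned base_idx main_p = rotD cleaned base_idx main_p := by
  unfold referral_ref_alternatives_alt rotD
  dsimp only
  have hNpos : (0:Int) < (cleaned.length : Int) := by exact_mod_cast hpos
  have hmodpos := PySem.Int.mod_nonneg (base_idx + 1) hNpos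
  have hmodlt := PySem.Int.mod_lt (base_idx + 1) hNpos
  set s : Nat := (PySem.Int.mod (base_idx + 1) (cleaned.length : Int)).toNat with hsdef
  have hcast : PySem.Int.mod (base_idx + 1) (cleaned.length : Int) = (s : Int) := by
    rw [hsdef, Int.toNat_of_nonneg hmodpos]
  have hs : s < cleaned.length := by omega
  set rot := cleaned.drop s ++ cleaned.take s with hrot
  -- switch the fold to rrStep2 over offset-tagged pairs
  set ps := (PySem.List.enumerate cleaned).map
      (fun p => (PySem.Int.mod (p.1 - base_idx - 1) (cleaned.length : Int), p.2)) with hps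
  have hfold : (PySem.List.enumerate cleaned).foldl
        (rrUpd main_p base_idx (cleaned.length : Int)) PySem.Dict.empty
      = ps.foldl (rrStep2 main_p) PySem.Dict.empty := by
    rw [hps, List.foldl_map]
    rfl
  rw [hfold]
  set first := ps.foldl (rrStep2 main_p) PySem.Dict.empty with hfirst
  have hperm : ps.Perm (PySem.List.enumerate rot) := by
    rw [hps, ps_eq_rot cleaned base_idx s hs hcast, ← hrot]
    calc ((PySem.List.enumerate rot).drop (cleaned.length - s)
            ++ (PySem.List.enumerate rot).take (cleaned.length - s)).Perm
          ((PySem.List.enumerate rot).take (cleaned.length - s)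
            ++ (PySem.List.enumerate rot).drop (cleaned.length - s)) := List.perm_append_comm
      _ = PySem.List.enumerate rot := List.take_append_drop _ _
  -- key values: the minimal offset of c is its first index in rot
  have hval : ∀ c ∈ rot, c ≠ main_p →
      PySem.Dict.getD first c 0 = ((List.idxOf c rot : Nat) : Int) := by
    intro c hc hcm
    have hg : first.get? c = some (0 + (List.idxOf c rot : Int)) := by
      rw [hfirst, get?_fold main_p ps PySem.Dict.empty c hcm, PySem.Dict.get?_empty]
      have hvalsperm : ((ps.filter (fun p => p.2 == c)).map (·.1)).Perm
          (((PySem.List.enumerate rot).filter (fun p => p.2 == c)).map (·.1)) :=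
        (hperm.filter _).map _
      rw [omin_perm hvalsperm, omin_enum c rot 0 hc]
    rw [PySem.Dict.getD_of_get?_eq_some _ _ hg]
    omega
  -- membership in keys
  have hmemrot : ∀ a : String, a ∈ rot ↔ a ∈ cleaned := by
    intro a
    rw [hrot]
    exact (List.perm_append_comm.trans
      (List.Perm.of_eq (List.take_append_drop s cleaned))).mem_iff
  have hsnd : ps.map (·.2) = cleaned := by
    rw [hps, List.map_map]
    exact PySem.List.map_snd_enumerate cleaned 0
  have hmemkeys : ∀ a : String, a ∈ first.keys ↔ (a ∈ cleaned ∧ a ≠ main_p) := by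
    intro a
    rw [hfirst, mem_keys_fold]
    rw [PySem.Dict.keys_empty]
    simp only [List.not_mem_nil, false_or]
    constructor
    · rintro ⟨p, hp, h2, h3⟩
      refine ⟨?_, h3⟩
      rw [← hsnd]
      exact List.mem_map.mpr ⟨p, hp, h2⟩
    · rintro ⟨h1, h2⟩
      have hmem : a ∈ ps.map (·.2) := by rw [hsnd]; exact h1
      rcases List.mem_map.mp hmem with ⟨p, hp, h3⟩
      exact ⟨p, hp, h3, h2⟩
  -- target list
  set ys := PySem.List.dedup (rot.filter (fun c => c != main_p)) with hys
  have hmemys : ∀ a : String, a ∈ ys ↔ (a ∈ cleaned ∧ a ≠ main_p) := by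
    intro a
    rw [hys, PySem.List.mem_dedup, List.mem_filter, hmemrot]
    simp
  apply PySem.List.sorted_eq_of_perm_of_pairwise_lt
  · -- ys.Perm first.keys
    rw [List.perm_ext_iff_of_nodup (PySem.List.nodup_dedup _)
      (keys_nodup_fold main_p ps PySem.Dict.empty (by rw [PySem.Dict.keys_empty]; simp))]
    intro a
    rw [hmemys, hmemkeys]
  · -- ys strictly increasing under the dict key
    have hpw : ys.Pairwise (fun a b => rot.idxOf a < rot.idxOf b) := by
      have h1 := pairwise_dedup_idx (rot.filter (fun c => c != main_p))
      rw [← hys] at h1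
      apply h1.imp_of_mem
      intro a b ha hb hlt
      have ha' : a ∈ rot.filter (fun c => c != main_p) := by
        rw [hys, PySem.List.mem_dedup] at ha; exact ha
      have hb' : b ∈ rot.filter (fun c => c != main_p) := by
        rw [hys, PySem.List.mem_dedup] at hb; exact hb
      exact idxOf_filter_lt _ rot a b ha' hb' hlt
    apply hpw.imp_of_mem
    intro a b ha hb hlt
    have ha2 := (hmemys a).mp ha
    have hb2 := (hmemys b).mp hb
    rw [hval a ((hmemrot a).mpr ha2.1) ha2.2, hval b ((hmemrot b).mpr hb2.1) hb2.2]
    exact_mod_cast hlt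

-- empty input: both return []
lemma A_nil (base_idx : Int) (main_p : String) :
    referral_ref_alternatives [] base_idx main_p = [] := rfl

lemma B_nil (base_idx : Int) (main_p : String) :
    referral_ref_alternatives_alt [] base_idx main_p = [] := rfl

-- ===== VERDICT (by name: the statement is the Claim_ definition above) =====
theorem referral_ref_alternatives_spec : Claim_equal_referral_ref_alternatives := by
  intro cleaned base_idx main_p _
  show referral_ref_alternatives cleaned base_idx main_p
      = referral_ref_alternatives_alt cleaned base_idx main_p
  rcases Nat.eq_zero_or_pos cleaned.length with h0 | hpos
  · have he : cleaned = [] := List.eq_nil_of_length_eq_zero h0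
    subst he
    rw [A_nil, B_nil]
  · rw [A_eq_rotD cleaned base_idx main_p hpos, B_eq_rotD cleaned base_idx main_p hpos]
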